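-- pv_equiv track=rewrite | github.com/LorenzoAgnolucci/Gutenberg | src/words.py | expected_word_lengths_for_line
-- ===== SOURCE A (Python) =====
-- from typing import TextIO, List, Tuple
--
-- LETTER_LENGTH_MAPPING = {
--     'a': 11,
--     'b': 10,
--     'c': 7,
--     'd': 9,
--     'e': 7,
--     'f': 7,
--     'g': 13,
--     'h': 11,
--     'i': 5,
--     'l': 5,
--     'm': 19,
--     'n': 12,
--     'o': 11,
--     'p': 11,
--     'q': 10,
--     'r': 8,
--     's': 12,
--     't': 7,
--     'u': 11,
--     'v': 10,
--     'x': 9,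
--     'y': 5,
--     'z': 11,
--     '.': 3,
--     ':': 3
-- }
--
-- ALTERNATIVES_LENGTH_MAPPING = {
--     "et": 10,
--     "quod": 15,
-- }
--
-- def expected_word_lengths_for_line(line_text: str) -> List[List[int]]:
--     """
--     Computes all the possible words lengths for a line transcription (there may be multiple alternatives due to abbreviations,
--     e.g. "et" -> "e", "quod" -> "q;", "dominus" -> "dms", etc.)
--     :param line_text: (string) Line transcription
--     :return: a list of all possible expected word lengths
--     """
--     words = line_text.lower().strip("\n =").split(" ")
--     expected_lengths_line = [[]]
--
--     for word in words:
--         if word in ALTERNATIVES_LENGTH_MAPPING: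
--             for line_length in expected_lengths_line[:]:
--                 expected_lengths_line.append(line_length + [sum([LETTER_LENGTH_MAPPING[x] - 1 for x in word])])
--                 line_length.append(ALTERNATIVES_LENGTH_MAPPING[word])
--         else:
--             for line_length in expected_lengths_line:
--                 line_length.append(sum([LETTER_LENGTH_MAPPING[x] - 1 for x in word]))
--
--     return expected_lengths_line
-- ===== SOURCE B (Python) =====
-- LETTER_LENGTH_MAPPING = {
--     'a': 11, 'b': 10, 'c': 7, 'd': 9, 'e': 7, 'f': 7, 'g': 13, 'h': 11,
--     'i': 5, 'l': 5, 'm': 19, 'n': 12, 'o': 11, 'p': 11, 'q': 10, 'r': 8,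
--     's': 12, 't': 7, 'u': 11, 'v': 10, 'x': 9, 'y': 5, 'z': 11, '.': 3, ':': 3
-- }
--
-- ALTERNATIVES_LENGTH_MAPPING = {
--     "et": 10,
--     "quod": 15,
-- }
--
-- def _build(words):
--     # recursion on the word list: combinations for the tail, then prepend each
--     # option of the first word (inner loop), so the first word varies fastest
--     if not words:
--         return [[]]
--     w = words[0]
--     spelled = 0
--     for x in w:
--         spelled += LETTER_LENGTH_MAPPING[x] - 1
--     if w in ALTERNATIVES_LENGTH_MAPPING:
--         opts = [ALTERNATIVES_LENGTH_MAPPING[w], spelled]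
--     else:
--         opts = [spelled]
--     return [[x] + c for c in _build(words[1:]) for x in opts]
--
-- def expected_word_lengths_for_line(line_text):
--     return _build(line_text.lower().strip("\n =").split(" "))
-- ===== Notes on version B (the rewrite author's own statement) =====
-- stated objective: alternative
-- what changed: A grows one shared list of partial rows in place (iterating over a copy and mutating rows on abbreviation words); B instead recurses on the word list, building the combinations for the tail and prepending each length option of the head word, so rows are built back-to-front by cons with no mutation.
import Mathlib
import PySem

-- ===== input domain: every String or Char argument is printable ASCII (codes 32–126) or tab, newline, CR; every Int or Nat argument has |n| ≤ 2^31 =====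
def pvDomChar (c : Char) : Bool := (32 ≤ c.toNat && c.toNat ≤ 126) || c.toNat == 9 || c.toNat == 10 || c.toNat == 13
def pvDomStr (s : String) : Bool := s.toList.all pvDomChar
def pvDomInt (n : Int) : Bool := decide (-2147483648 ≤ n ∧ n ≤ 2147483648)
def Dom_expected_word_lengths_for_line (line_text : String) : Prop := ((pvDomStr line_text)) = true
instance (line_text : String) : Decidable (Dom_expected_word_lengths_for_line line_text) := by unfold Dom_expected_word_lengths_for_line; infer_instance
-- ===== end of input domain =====

-- B replaces A's in-place growing of a shared row list (iterating a copy while mutating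
-- on abbreviation words) by a recursion on the word list that builds the tail's
-- combinations first and conses each option of the head word in front ("alternative").

-- shared module constants (same in both Pythons)
def pvLetterDict : PySem.Dict Char Int :=
  PySem.Dict.ofList [('a', 11), ('b', 10), ('c', 7), ('d', 9), ('e', 7), ('f', 7), ('g', 13), ('h', 11),
   ('i', 5), ('l', 5), ('m', 19), ('n', 12), ('o', 11), ('p', 11), ('q', 10), ('r', 8),
   ('s', 12), ('t', 7), ('u', 11), ('v', 10), ('x', 9), ('y', 5), ('z', 11), ('.', 3), (':', 3)]

def pvAltDict : PySem.Dict (List Char) Int :=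
  PySem.Dict.ofList [(['e', 't'], 10), (['q', 'u', 'o', 'd'], 15)]

-- ===== PORT A =====
-- sum([LETTER_LENGTH_MAPPING[x] - 1 for x in word]); getD 0 is only hit outside Pre_ (Python: KeyError)
def pvWordLen (word : List Char) : Int :=
  (word.map (fun x => (PySem.Dict.get? pvLetterDict x).getD 0 - 1)).sum

def expected_word_lengths_for_line (line_text : String) : List (List Int) :=
  let words := PySem.Chars.splitOn (PySem.Chars.stripChars (PySem.Chars.lower line_text.toList) ['\n', ' ', '=']) [' ']
  words.foldl
    (fun expected_lengths_line word =>
      match PySem.Dict.get? pvAltDict word with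
      | some altv =>
          -- for line_length in expected_lengths_line[:]: append the spelled-out copy, then
          -- mutate line_length in place; mutated originals keep their positions, copies go to the end
          let p := expected_lengths_line.foldl
            (fun (acc : List (List Int) × List (List Int)) line_length =>
              (acc.1 ++ [line_length ++ [altv]], acc.2 ++ [line_length ++ [pvWordLen word]]))
            ([], [])
          p.1 ++ p.2
      | none => expected_lengths_line.map (fun line_length => line_length ++ [pvWordLen word]))
    [[]]

-- ===== PORT B =====
-- B's explicit accumulation loop 'for x in w: spelled += LETTER_LENGTH_MAPPING[x] - 1'
def pvSpelled (word : List Char) : Int :=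
  word.foldl (fun spelled x => spelled + ((PySem.Dict.get? pvLetterDict x).getD 0 - 1)) 0

-- _build(words): recursion on the word list; [[x] + c for c in _build(rest) for x in opts]
def pvBuild : List (List Char) → List (List Int)
  | [] => [[]]
  | w :: rest =>
      let opts : List Int :=
        if (PySem.Dict.get? pvAltDict w).isSome then
          [(PySem.Dict.get? pvAltDict w).getD 0, pvSpelled w]
        else
          [pvSpelled w]
      (pvBuild rest).flatMap (fun c => opts.map (fun x => x :: c))

def expected_word_lengths_for_line_alt (line_text : String) : List (List Int) :=
  pvBuild (PySem.Chars.splitOn (PySem.Chars.stripChars (PySem.Chars.lower line_text.toList) ['\n', ' ', '=']) [' '])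

-- ===== PRECONDITION & SPEC =====
-- Pre_ excludes inputs on which Python A raises KeyError: a character (other than the space
-- separator) of the lowered, stripped line that is not a key of LETTER_LENGTH_MAPPING.
def Pre_expected_word_lengths_for_line (line_text : String) : Prop :=
  ((PySem.Chars.stripChars (PySem.Chars.lower line_text.toList) ['\n', ' ', '=']).all
    (fun c => c == ' ' || (PySem.Dict.get? pvLetterDict c).isSome)) = true
instance (line_text : String) : Decidable (Pre_expected_word_lengths_for_line line_text) := by
  unfold Pre_expected_word_lengths_for_line; infer_instance

def pvWitness_expected_word_lengths_for_line : String := "et quod ab"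

def Spec_expected_word_lengths_for_line (line_text : String) (out : List (List Int)) : Prop := out = expected_word_lengths_for_line_alt line_text
instance (line_text : String) (out : List (List Int)) : Decidable (Spec_expected_word_lengths_for_line line_text out) := by unfold Spec_expected_word_lengths_for_line; infer_instance

-- ===== CLAIM (what is proved, stated in full; the proofs are below) =====
def Claim_equal_expected_word_lengths_for_line : Prop := ∀ (line_text : String), Dom_expected_word_lengths_for_line line_text → Pre_expected_word_lengths_for_line line_text → Spec_expected_word_lengths_for_line line_text (expected_word_lengths_for_line line_text)

-- ===== LEMMAS AND PROOFS =====

-- B's accumulation loop computes A's map-sum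
theorem pvSpelled_eq (word : List Char) : pvSpelled word = pvWordLen word := by
  have aux : ∀ (w : List Char) (s : Int),
      w.foldl (fun spelled x => spelled + ((PySem.Dict.get? pvLetterDict x).getD 0 - 1)) s
        = s + (w.map (fun x => (PySem.Dict.get? pvLetterDict x).getD 0 - 1)).sum := by
    intro w
    induction w with
    | nil => intro s; simp
    | cons x xs ih => intro s; simp [List.foldl_cons, ih, add_assoc]
  unfold pvSpelled pvWordLen
  simpa using aux word 0

-- the option list of a word (proof-side abbreviation)
def pvOptsOf (word : List Char) : List Int :=
  match PySem.Dict.get? pvAltDict word with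
  | some altv => [altv, pvWordLen word]
  | none => [pvWordLen word]

-- A's in-place pass over a copy, in accumulator form
theorem pvPairFold (L : List (List Int)) (a f : Int) (m n : List (List Int)) :
    L.foldl (fun (acc : List (List Int) × List (List Int)) l =>
        (acc.1 ++ [l ++ [a]], acc.2 ++ [l ++ [f]])) (m, n)
      = (m ++ L.map (· ++ [a]), n ++ L.map (· ++ [f])) := by
  induction L generalizing m n with
  | nil => simp
  | cons x xs ih => simp [List.foldl_cons, ih]

-- A's step on one word is a flatMap over that word's option list
theorem pvStepA (L : List (List Int)) (word : List Char) :
    (match PySem.Dict.get? pvAltDict word with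
      | some altv =>
          let p := L.foldl
            (fun (acc : List (List Int) × List (List Int)) line_length =>
              (acc.1 ++ [line_length ++ [altv]], acc.2 ++ [line_length ++ [pvWordLen word]]))
            ([], [])
          p.1 ++ p.2
      | none => L.map (fun line_length => line_length ++ [pvWordLen word]))
      = (pvOptsOf word).flatMap (fun x => L.map (· ++ [x])) := by
  unfold pvOptsOf
  cases PySem.Dict.get? pvAltDict word with
  | none => simp
  | some altv => simp [pvPairFold]

-- unfolding one step of B's recursion
theorem pvBuild_cons (w : List Char) (rest : List (List Char)) :
    pvBuild (w :: rest)
      = (pvBuild rest).flatMap (fun c =>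
          (if (PySem.Dict.get? pvAltDict w).isSome then
              [(PySem.Dict.get? pvAltDict w).getD 0, pvSpelled w]
            else [pvSpelled w]).map (fun x => x :: c)) := rfl

-- B's per-word options are pvOptsOf
theorem pvOpts_eq (w : List Char) :
    (if (PySem.Dict.get? pvAltDict w).isSome then
        [(PySem.Dict.get? pvAltDict w).getD 0, pvSpelled w]
      else [pvSpelled w]) = pvOptsOf w := by
  unfold pvOptsOf
  cases h : PySem.Dict.get? pvAltDict w with
  | none => simp [pvSpelled_eq]
  | some altv => simp [pvSpelled_eq]

-- main invariant: A's loop over any word list, started from any row list L, equals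
-- B's recursion with every row of L as prefix
theorem pvMain (ws : List (List Char)) (L : List (List Int)) :
    ws.foldl
      (fun expected_lengths_line word =>
        match PySem.Dict.get? pvAltDict word with
        | some altv =>
            let p := expected_lengths_line.foldl
              (fun (acc : List (List Int) × List (List Int)) line_length =>
                (acc.1 ++ [line_length ++ [altv]], acc.2 ++ [line_length ++ [pvWordLen word]]))
              ([], [])
            p.1 ++ p.2
        | none => expected_lengths_line.map (fun line_length => line_length ++ [pvWordLen word]))
      L
      = (pvBuild ws).flatMap (fun c => L.map (· ++ c)) := by
  induction ws generalizing L with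
  | nil => simp [pvBuild]
  | cons w ws ih =>
      rw [List.foldl_cons, ih, pvStepA]
      rw [pvBuild_cons, pvOpts_eq]
      simp [List.flatMap_map, List.map_flatMap, List.flatMap_assoc, List.map_map,
            Function.comp_def, List.append_assoc]

-- ===== VERDICT (by name: the statement is the Claim_ definition above) =====
theorem expected_word_lengths_for_line_spec : Claim_equal_expected_word_lengths_for_line := by
  intro line_text _ _
  unfold Spec_expected_word_lengths_for_line
  unfold expected_word_lengths_for_line expected_word_lengths_for_line_alt
  rw [pvMain]
  simp
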